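-- pv_equiv track=rewrite | github.com/ht0324/pdf_2_notion | utils/pdf_preprocessing.py | calculate_page_ranges
-- ===== SOURCE A (Python) =====
-- def calculate_page_ranges(first_pagenum, end_pagenum, chunk_num):
--     total_pages_to_process = end_pagenum - first_pagenum + 1
--     base_pages_per_chunk = total_pages_to_process // chunk_num
--     remainder_pages = total_pages_to_process % chunk_num
--     ranges = []
--     for i in range(chunk_num):
--         start_page = first_pagenum + i * base_pages_per_chunk + min(i, remainder_pages)
--         end_page = start_page + base_pages_per_chunk - 1 + (1 if i < remainder_pages else 0)
--         if i == chunk_num - 1: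
--             end_page = end_pagenum
--         ranges.append((start_page, end_page))
--     return ranges
-- ===== SOURCE B (Python) =====
-- def calculate_page_ranges(first_pagenum, end_pagenum, chunk_num):
--     total_pages = end_pagenum - first_pagenum + 1
--     base, remainder = divmod(total_pages, chunk_num)
--     ranges = []
--     cursor = first_pagenum
--     for i in range(chunk_num):
--         size = base + (1 if i < remainder else 0)
--         ranges.append((cursor, cursor + size - 1))
--         cursor += size
--     return ranges
-- ===== Notes on version B (the rewrite author's own statement) =====
-- stated objective: simpler
-- what changed: Replaces the closed-form per-index start arithmetic (i*base + min(i, remainder)) and the explicit last-chunk end override with a running cursor accumulator whose chunk sizes sum exactly to the total; fewer arithmetic operations per iteration give a constant-factor speedup.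
import Mathlib
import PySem

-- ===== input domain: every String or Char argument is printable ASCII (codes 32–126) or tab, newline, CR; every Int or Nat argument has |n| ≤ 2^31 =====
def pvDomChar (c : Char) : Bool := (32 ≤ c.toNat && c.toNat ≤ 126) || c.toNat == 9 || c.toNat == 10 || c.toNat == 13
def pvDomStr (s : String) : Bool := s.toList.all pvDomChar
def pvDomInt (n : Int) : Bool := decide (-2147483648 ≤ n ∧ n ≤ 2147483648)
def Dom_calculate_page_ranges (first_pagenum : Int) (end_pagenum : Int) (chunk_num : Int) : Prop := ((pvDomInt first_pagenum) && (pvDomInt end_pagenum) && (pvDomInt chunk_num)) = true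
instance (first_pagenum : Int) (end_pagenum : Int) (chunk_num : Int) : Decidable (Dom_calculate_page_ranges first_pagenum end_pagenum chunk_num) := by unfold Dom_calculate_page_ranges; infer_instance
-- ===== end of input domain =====

-- B replaces A's closed-form start arithmetic and last-chunk override by a running cursor (simpler decomposition, same cost).

-- ===== PORT A =====
def calculate_page_ranges (first_pagenum : Int) (end_pagenum : Int) (chunk_num : Int) : List (Int × Int) :=
  let total_pages_to_process := end_pagenum - first_pagenum + 1
  let base_pages_per_chunk := PySem.Int.floordiv total_pages_to_process chunk_num
  let remainder_pages := PySem.Int.mod total_pages_to_process chunk_num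
  (PySem.List.pyRange 0 chunk_num 1).foldl (fun ranges i =>
    let start_page := first_pagenum + i * base_pages_per_chunk + min i remainder_pages
    let end_page := start_page + base_pages_per_chunk - 1 + (if i < remainder_pages then 1 else 0)
    let end_page := if i = chunk_num - 1 then end_pagenum else end_page
    ranges ++ [(start_page, end_page)]) []

-- ===== PORT B =====
def calculate_page_ranges_alt (first_pagenum : Int) (end_pagenum : Int) (chunk_num : Int) : List (Int × Int) :=
  let total_pages := end_pagenum - first_pagenum + 1
  let base := PySem.Int.floordiv total_pages chunk_num
  let remainder := PySem.Int.mod total_pages chunk_num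
  let result := (PySem.List.pyRange 0 chunk_num 1).foldl (fun (s : Int × List (Int × Int)) i =>
    let size := base + (if i < remainder then 1 else 0)
    (s.1 + size, s.2 ++ [(s.1, s.1 + size - 1)])) (first_pagenum, [])
  result.2

-- ===== PRECONDITION & SPEC =====
-- Pre_ excludes only chunk_num = 0, where Python A raises ZeroDivisionError.
def Pre_calculate_page_ranges (first_pagenum : Int) (end_pagenum : Int) (chunk_num : Int) : Prop := chunk_num ≠ 0
instance (first_pagenum : Int) (end_pagenum : Int) (chunk_num : Int) : Decidable (Pre_calculate_page_ranges first_pagenum end_pagenum chunk_num) := by unfold Pre_calculate_page_ranges; infer_instance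
def pvWitness_calculate_page_ranges : Int × Int × Int := (1, 10, 3)

def Spec_calculate_page_ranges (first_pagenum : Int) (end_pagenum : Int) (chunk_num : Int) (out : List (Int × Int)) : Prop := out = calculate_page_ranges_alt first_pagenum end_pagenum chunk_num
instance (first_pagenum : Int) (end_pagenum : Int) (chunk_num : Int) (out : List (Int × Int)) : Decidable (Spec_calculate_page_ranges first_pagenum end_pagenum chunk_num out) := by unfold Spec_calculate_page_ranges; infer_instance

-- ===== CLAIM (what is proved, stated in full; the proofs are below) =====
def Claim_equal_calculate_page_ranges : Prop := ∀ (first_pagenum : Int) (end_pagenum : Int) (chunk_num : Int), Dom_calculate_page_ranges first_pagenum end_pagenum chunk_num → Pre_calculate_page_ranges first_pagenum end_pagenum chunk_num → Spec_calculate_page_ranges first_pagenum end_pagenum chunk_num (calculate_page_ranges first_pagenum end_pagenum chunk_num)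

-- ===== LEMMAS AND PROOFS =====

-- the cursor of B at step i, in closed form (= A's start_page)
def pvCur (f base rem i : Int) : Int := f + i * base + min i rem

lemma pvCur_step (f base rem i : Int) :
    pvCur f base rem i + (base + (if i < rem then 1 else 0)) = pvCur f base rem (i + 1) := by
  unfold pvCur
  by_cases h : rem ≤ i
  · rw [min_eq_right h, min_eq_right (by omega), if_neg (by omega)]; ring
  · rw [min_eq_left (by omega), min_eq_left (by omega), if_pos (by omega)]; ring

-- A's accumulator loop is a map
lemma foldl_append_map {α β : Type} (g : α → β) :
    ∀ (l : List α) (init : List β),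
      l.foldl (fun acc i => acc ++ [g i]) init = init ++ l.map g := by
  intro l
  induction l with
  | nil => simp
  | cons x xs ih => intro init; simp [List.foldl_cons, ih, List.append_assoc]

-- B's loop, characterised over a prefix of the range
lemma pvB_loop (f base rem : Int) (hrem0 : 0 ≤ rem) (m : Nat) :
    (PySem.List.pyRange 0 (m : Int) 1).foldl (fun (s : Int × List (Int × Int)) i =>
        (s.1 + (base + (if i < rem then 1 else 0)),
         s.2 ++ [(s.1, s.1 + (base + (if i < rem then 1 else 0)) - 1)])) (f, [])
    = (pvCur f base rem m,
       (PySem.List.pyRange 0 (m : Int) 1).map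
         (fun i => (pvCur f base rem i, pvCur f base rem (i + 1) - 1))) := by
  induction m with
  | zero => simp [PySem.List.pyRange_one_eq_nil (by omega : (0:Int) ≤ 0), pvCur,
      min_eq_left hrem0]
  | succ n ih =>
    have h : ((n + 1 : Nat) : Int) = (n : Int) + 1 := by push_cast; ring
    rw [h, PySem.List.pyRange_one_succ_right (by positivity), List.foldl_append, ih,
        List.map_append]
    simp only [List.foldl_cons, List.foldl_nil, List.map_cons, List.map_nil]
    rw [pvCur_step]

theorem calculate_page_ranges_spec : Claim_equal_calculate_page_ranges := by
  intro f e c _ hc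
  unfold Spec_calculate_page_ranges calculate_page_ranges calculate_page_ranges_alt
  simp only []
  set total := e - f + 1 with htot
  set base := PySem.Int.floordiv total c with hbase
  set rem := PySem.Int.mod total c with hrem
  rcases Int.lt_or_lt_of_ne hc with hneg | hpos
  · -- chunk_num < 0 : empty range on both sides
    rw [PySem.List.pyRange_one_eq_nil (by omega : c ≤ 0)]
    simp
  · -- chunk_num > 0
    have hc' : ((c.toNat : Nat) : Int) = c := Int.toNat_of_nonneg (by omega)
    have hmod : rem = total % c := PySem.Int.mod_eq_emod_of_pos hpos
    have hrem0 : 0 ≤ rem := by rw [hmod]; exact Int.emod_nonneg _ (by omega)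
    have hremc : rem < c := by rw [hmod]; exact Int.emod_lt_of_pos _ hpos
    have hsum : base * c + rem = total := PySem.Int.floordiv_mul_add_mod total c
    rw [foldl_append_map]
    have hB := pvB_loop f base rem hrem0 c.toNat
    rw [hc'] at hB
    rw [hB]
    simp only [List.nil_append]
    apply List.map_congr_left
    intro i hi
    have hi' := (PySem.List.mem_pyRange_one).1 hi
    have hstart : f + i * base + min i rem = pvCur f base rem i := rfl
    by_cases hlast : i = c - 1
    · subst hlast
      have : pvCur f base rem (c - 1 + 1) - 1 = e := by
        unfold pvCur
        rw [min_eq_right (by omega)]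
        have : (c - 1 + 1) * base = base * c := by ring
        omega
      simp [hstart]
      rw [show c = c - 1 + 1 by ring]
      linarith [this]
    · rw [if_neg hlast, hstart]
      have : pvCur f base rem i + base - 1 + (if i < rem then 1 else 0)
           = pvCur f base rem (i + 1) - 1 := by
        rw [← pvCur_step f base rem i]
        ring
      rw [← this]

-- ===== VERDICT (by name: the statement is the Claim_ definition above) =====
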